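-- pv_equiv track=rewrite | github.com/Ylizin/RWSim | ylSim/generateFeature.py | generateFeaturesByBins
-- ===== SOURCE A (Python) =====
-- def generateFeaturesByBins(npArray,binsBorders):
--
--     intervals = [[] for _ in binsBorders] #create intervals for each of the borders
--     for ide,element in enumerate(npArray):
--         for idx,border in enumerate(binsBorders):
--             if element < border:
--                 intervals[idx].append(ide)
--                 break
--         else:
--             intervals[-1].append(ide)
--
--     return intervals
-- ===== SOURCE B (Python) =====
-- def generateFeaturesByBins(npArray, binsBorders):
--     # Staircase of strictly increasing prefix maxima of the borders:
--     # only these borders can ever be the FIRST border strictly greater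
--     # than a given element.  stairs = [(value, original index)], values
--     # strictly increasing, so each element is placed by binary search.
--     stairs = []
--     for idx, border in enumerate(binsBorders):
--         if not stairs or stairs[-1][0] < border:
--             stairs.append((border, idx))
--     intervals = [[] for _ in binsBorders]
--     last = len(binsBorders) - 1
--     n = len(stairs)
--     for ide, element in enumerate(npArray):
--         # binary search: position of the first stair value strictly greater than element
--         lo, hi = 0, n
--         while lo < hi:
--             mid = (lo + hi) // 2
--             if stairs[mid][0] <= element:
--                 lo = mid + 1
--             else:
--                 hi = mid
--         idx = stairs[lo][1] if lo < n else last
--         intervals[idx].append(ide)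
--     return intervals
-- ===== Notes on version B (the rewrite author's own statement) =====
-- stated objective: faster
-- what changed: B precomputes the staircase of strictly increasing prefix maxima of the borders once and places each element by binary search over it, instead of A's linear scan of all borders for every element.
import Mathlib
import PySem

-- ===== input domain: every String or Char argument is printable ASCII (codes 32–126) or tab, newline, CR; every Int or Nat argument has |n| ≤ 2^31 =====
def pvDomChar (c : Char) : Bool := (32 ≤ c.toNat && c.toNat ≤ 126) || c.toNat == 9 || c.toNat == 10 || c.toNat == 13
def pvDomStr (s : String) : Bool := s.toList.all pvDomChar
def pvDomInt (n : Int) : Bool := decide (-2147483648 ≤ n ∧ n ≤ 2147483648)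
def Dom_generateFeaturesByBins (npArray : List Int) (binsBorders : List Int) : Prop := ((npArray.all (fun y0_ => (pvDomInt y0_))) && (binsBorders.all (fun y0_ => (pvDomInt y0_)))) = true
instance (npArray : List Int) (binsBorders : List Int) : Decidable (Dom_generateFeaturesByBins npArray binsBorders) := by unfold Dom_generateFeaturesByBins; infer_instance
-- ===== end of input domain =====

-- B replaces A's per-element linear scan of all borders by a binary search over
-- the precomputed staircase of strictly increasing prefix maxima of the borders
-- (objective: faster, O(n*b) → O(b + n log b)).

-- ===== PORT A =====

-- intervals[idx].append(v); idx comes from enumerate so it is nonnegative and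
-- in range, hence .toNat at the call sites is exact
def pvAppendAt (xs : List (List Int)) (i : Nat) (v : Int) : List (List Int) :=
  xs.set i (xs.getD i [] ++ [v])

-- the inner `for idx,border in enumerate(binsBorders): if element < border: … break`
def pvInnerA (element : Int) : List (Int × Int) → Option Int
  | [] => none
  | p :: rest => if element < p.2 then some p.1 else pvInnerA element rest

def generateFeaturesByBins (npArray : List Int) (binsBorders : List Int) : List (List Int) :=
  let init := binsBorders.map (fun _ => ([] : List Int))
  (PySem.List.enumerate npArray).foldl (fun intervals p =>
    match pvInnerA p.2 (PySem.List.enumerate binsBorders) with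
    | some idx => pvAppendAt intervals idx.toNat p.1
    -- intervals[-1]: last slot; Python raises on empty intervals (excluded by Pre_)
    | none => pvAppendAt intervals (intervals.length - 1) p.1) init

-- ===== PORT B =====

-- `if not stairs or stairs[-1][0] < border: stairs.append((border, idx))`
def pvStairStep (st : List (Int × Int)) (p : Int × Int) : List (Int × Int) :=
  match st.getLast? with
  | none => st ++ [(p.2, p.1)]
  | some q => if q.1 < p.2 then st ++ [(p.2, p.1)] else st

def pvStairs (binsBorders : List Int) : List (Int × Int) :=
  (PySem.List.enumerate binsBorders).foldl pvStairStep []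

-- the `while lo < hi` binary-search loop
def pvBsearch (stairs : List (Int × Int)) (e : Int) (lo hi : Nat) : Nat :=
  if h : lo < hi then
    let mid := (lo + hi) / 2
    if (stairs.getD mid (0, 0)).1 ≤ e then pvBsearch stairs e (mid + 1) hi
    else pvBsearch stairs e lo mid
  else lo
termination_by hi - lo
decreasing_by all_goals omega

def generateFeaturesByBins_alt (npArray : List Int) (binsBorders : List Int) : List (List Int) :=
  let stairs := pvStairs binsBorders
  let intervals := binsBorders.map (fun _ => ([] : List Int))
  let last := binsBorders.length - 1
  let n := stairs.length
  (PySem.List.enumerate npArray).foldl (fun intervals p =>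
    let lo := pvBsearch stairs p.2 0 n
    let idx := if lo < n then ((stairs.getD lo (0, 0)).2).toNat else last
    pvAppendAt intervals idx p.1) intervals

-- ===== PRECONDITION & SPEC =====
-- Pre_ excludes only the inputs on which A raises IndexError (empty binsBorders
-- with a nonempty npArray: `intervals[-1]` on the empty list); B raises there too.
def Pre_generateFeaturesByBins (npArray : List Int) (binsBorders : List Int) : Prop :=
  binsBorders ≠ [] ∨ npArray = []
instance (npArray : List Int) (binsBorders : List Int) : Decidable (Pre_generateFeaturesByBins npArray binsBorders) := by unfold Pre_generateFeaturesByBins; infer_instance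

def pvWitness_generateFeaturesByBins : List Int × List Int := ([0, 5, -2], [1, 3])

def Spec_generateFeaturesByBins (npArray : List Int) (binsBorders : List Int) (out : List (List Int)) : Prop := out = generateFeaturesByBins_alt npArray binsBorders
instance (npArray : List Int) (binsBorders : List Int) (out : List (List Int)) : Decidable (Spec_generateFeaturesByBins npArray binsBorders out) := by unfold Spec_generateFeaturesByBins; infer_instance

-- ===== CLAIM (what is proved, stated in full; the proofs are below) =====
def Claim_equal_generateFeaturesByBins : Prop := ∀ (npArray : List Int) (binsBorders : List Int), Dom_generateFeaturesByBins npArray binsBorders → Pre_generateFeaturesByBins npArray binsBorders → Spec_generateFeaturesByBins npArray binsBorders (generateFeaturesByBins npArray binsBorders)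

-- ===== LEMMAS AND PROOFS =====

-- specification device: the stored index of the first stair with value > e
def pvFirstGt (e : Int) : List (Int × Int) → Option Int
  | [] => none
  | p :: r => if e < p.1 then some p.2 else pvFirstGt e r

theorem pvStairStep_def (st : List (Int × Int)) (i b : Int) :
    pvStairStep st (i, b) = match st.getLast? with
      | none => st ++ [(b, i)]
      | some q => if q.1 < b then st ++ [(b, i)] else st := rfl

theorem pvStairs_append (bs : List Int) (b : Int) :
    pvStairs (bs ++ [b]) = pvStairStep (pvStairs bs) ((bs.length : Int), b) := by
  simp [pvStairs, PySem.List.enumerate_append, PySem.List.enumerate_cons,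
    PySem.List.enumerate_nil, List.foldl_append]

theorem pvInnerA_append (e : Int) (l₁ l₂ : List (Int × Int)) :
    pvInnerA e (l₁ ++ l₂) =
      match pvInnerA e l₁ with | some j => some j | none => pvInnerA e l₂ := by
  induction l₁ with
  | nil => simp [pvInnerA]
  | cons p r ih => by_cases h : e < p.2 <;> simp [pvInnerA, h, ih]

theorem pvFirstGt_append (e : Int) (l₁ l₂ : List (Int × Int)) :
    pvFirstGt e (l₁ ++ l₂) =
      match pvFirstGt e l₁ with | some j => some j | none => pvFirstGt e l₂ := by
  induction l₁ with
  | nil => simp [pvFirstGt]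
  | cons p r ih => by_cases h : e < p.1 <;> simp [pvFirstGt, h, ih]

theorem pvInnerA_enum_none (e : Int) (bs : List Int) (s : Int) :
    pvInnerA e (PySem.List.enumerate bs s) = none ↔ ∀ x ∈ bs, x ≤ e := by
  induction bs generalizing s with
  | nil => simp [PySem.List.enumerate_nil, pvInnerA]
  | cons b r ih =>
    rw [PySem.List.enumerate_cons]
    by_cases h : e < b
    · simp [pvInnerA, h]
    · simp [pvInnerA, h, ih]
      intro _; omega

theorem pvFirstGt_eq_none (e : Int) (s : List (Int × Int))
    (h : ∀ p ∈ s, p.1 ≤ e) : pvFirstGt e s = none := by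
  induction s with
  | nil => rfl
  | cons p r ih =>
    have h1 : p.1 ≤ e := h p (by simp)
    have h2 : ¬ e < p.1 := by omega
    simp only [pvFirstGt, if_neg h2]
    exact ih (fun q hq => h q (by simp [hq]))

-- invariant of the staircase fold: strictly increasing values, values drawn from
-- the borders, and the last value is the maximum
theorem pvStairs_inv (bs : List Int) :
    (pvStairs bs).Pairwise (fun a b => a.1 < b.1) ∧
    (∀ p ∈ pvStairs bs, p.1 ∈ bs) ∧
    (∀ p ∈ pvStairs bs, ∀ q, (pvStairs bs).getLast? = some q → p.1 ≤ q.1) := by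
  induction bs using List.reverseRecOn with
  | nil => simp [pvStairs, PySem.List.enumerate_nil]
  | append_singleton bs b ih =>
    obtain ⟨hpw, hmem, hlast⟩ := ih
    rw [pvStairs_append, pvStairStep_def]
    rcases hl : (pvStairs bs).getLast? with _ | q
    · have hnil : pvStairs bs = [] := List.getLast?_eq_none_iff.mp hl
      simp [hnil]
    · simp only
      by_cases hq : q.1 < b
      · have hall : ∀ p ∈ pvStairs bs, p.1 < b := fun p hp =>
          lt_of_le_of_lt (hlast p hp q hl) hq
        rw [if_pos hq]
        refine ⟨?_, ?_, ?_⟩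
        · rw [List.pairwise_append]
          exact ⟨hpw, by simp, by simpa using hall⟩
        · intro p hp
          rcases List.mem_append.mp hp with h | h
          · exact List.mem_append_left _ (hmem p h)
          · simp at h; simp [h]
        · intro p hp q' hq'
          rw [List.getLast?_concat] at hq'
          simp only [Option.some.injEq] at hq'
          rcases List.mem_append.mp hp with h | h
          · rw [← hq']; exact le_of_lt (hall p h)
          · simp at h; simp [h, ← hq']
      · rw [if_neg hq]
        exact ⟨hpw, fun p hp => List.mem_append_left _ (hmem p hp), hlast⟩

-- the staircase preserves "index of the first border strictly greater than e"
theorem pvFirstGt_stairs (e : Int) (bs : List Int) :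
    pvFirstGt e (pvStairs bs) = pvInnerA e (PySem.List.enumerate bs 0) := by
  induction bs using List.reverseRecOn with
  | nil => simp [pvStairs, PySem.List.enumerate_nil, pvFirstGt, pvInnerA]
  | append_singleton bs b ih =>
    have henum : PySem.List.enumerate (bs ++ [b]) 0 =
        PySem.List.enumerate bs 0 ++ [((bs.length : Int), b)] := by
      simp [PySem.List.enumerate_append, PySem.List.enumerate_cons, PySem.List.enumerate_nil]
    rw [pvStairs_append, pvStairStep_def, henum, pvInnerA_append]
    rcases ha : pvInnerA e (PySem.List.enumerate bs 0) with _ | j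
    · -- no border in bs exceeds e, hence no stair value exceeds e
      have hble : ∀ x ∈ bs, x ≤ e := (pvInnerA_enum_none e bs 0).mp ha
      have hvle : ∀ p ∈ pvStairs bs, p.1 ≤ e := fun p hp =>
        hble p.1 ((pvStairs_inv bs).2.1 p hp)
      have hstnone : pvFirstGt e (pvStairs bs) = none := pvFirstGt_eq_none e _ hvle
      rcases hl : (pvStairs bs).getLast? with _ | q
      · have hnil : pvStairs bs = [] := List.getLast?_eq_none_iff.mp hl
        simp [hnil, pvFirstGt, pvInnerA]
      · simp only
        by_cases hq : q.1 < b
        · rw [if_pos hq, pvFirstGt_append, hstnone]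
          simp [pvFirstGt, pvInnerA]
        · rw [if_neg hq, hstnone]
          have hqmem : q ∈ pvStairs bs := List.mem_of_getLast? hl
          have hble2 : b ≤ e := le_trans (by omega) (hvle q hqmem)
          simp [pvInnerA, show ¬ e < b by omega]
    · -- the first strictly greater border is inside bs
      have hsome : pvFirstGt e (pvStairs bs) = some j := by rw [ih]; exact ha
      rcases (pvStairs bs).getLast? with _ | q
      · rw [pvFirstGt_append, hsome]
      · simp only
        by_cases hq : q.1 < b
        · rw [if_pos hq, pvFirstGt_append, hsome]
        · rw [if_neg hq, hsome]

-- unfolding equations for the binary-search loop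
theorem pvBsearch_stop (s : List (Int × Int)) (e : Int) (lo hi : Nat) (h : ¬ lo < hi) :
    pvBsearch s e lo hi = lo := by
  rw [pvBsearch, dif_neg h]

theorem pvBsearch_go_right (s : List (Int × Int)) (e : Int) (lo hi : Nat) (h : lo < hi)
    (hc : (s.getD ((lo + hi) / 2) (0,0)).1 ≤ e) :
    pvBsearch s e lo hi = pvBsearch s e ((lo + hi) / 2 + 1) hi := by
  rw [pvBsearch, dif_pos h]
  exact if_pos hc

theorem pvBsearch_go_left (s : List (Int × Int)) (e : Int) (lo hi : Nat) (h : lo < hi)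
    (hc : ¬ (s.getD ((lo + hi) / 2) (0,0)).1 ≤ e) :
    pvBsearch s e lo hi = pvBsearch s e lo ((lo + hi) / 2) := by
  rw [pvBsearch, dif_pos h]
  exact if_neg hc

-- binary-search invariant: left of the result everything is ≤ e, from the result on
-- everything is > e (fuel-based induction on hi - lo)
theorem pvBsearch_inv (s : List (Int × Int)) (e : Int)
    (hs : ∀ i j, i < j → j < s.length → (s.getD i (0,0)).1 < (s.getD j (0,0)).1) :
    ∀ (fuel lo hi : Nat), hi - lo ≤ fuel → hi ≤ s.length → lo ≤ hi →
      (∀ i < lo, (s.getD i (0,0)).1 ≤ e) →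
      (∀ i, hi ≤ i → i < s.length → e < (s.getD i (0,0)).1) →
      (∀ i < pvBsearch s e lo hi, (s.getD i (0,0)).1 ≤ e) ∧
      (∀ i, pvBsearch s e lo hi ≤ i → i < s.length → e < (s.getD i (0,0)).1) ∧
      pvBsearch s e lo hi ≤ s.length := by
  intro fuel
  induction fuel with
  | zero =>
    intro lo hi hf hhi hlh hlow hhigh
    rw [pvBsearch_stop s e lo hi (by omega)]
    exact ⟨hlow, fun i h1 h2 => hhigh i (by omega) h2, by omega⟩
  | succ f ihf =>
    intro lo hi hf hhi hlh hlow hhigh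
    by_cases h : lo < hi
    · by_cases hc : (s.getD ((lo + hi) / 2) (0,0)).1 ≤ e
      · rw [pvBsearch_go_right s e lo hi h hc]
        refine ihf ((lo + hi) / 2 + 1) hi (by omega) hhi (by omega) ?_ hhigh
        intro i hi'
        by_cases hcl : i < (lo + hi) / 2
        · by_cases hc2 : i < lo
          · exact hlow i hc2
          · exact le_of_lt (lt_of_lt_of_le (hs i ((lo + hi) / 2) hcl (by omega)) hc)
        · have : i = (lo + hi) / 2 := by omega
          rw [this]; exact hc
      · rw [pvBsearch_go_left s e lo hi h hc]
        refine ihf lo ((lo + hi) / 2) (by omega) (by omega) (by omega) hlow ?_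
        intro i hmi hil
        by_cases hcl : (lo + hi) / 2 < i
        · exact lt_trans (by omega) (hs ((lo + hi) / 2) i hcl hil)
        · have : i = (lo + hi) / 2 := by omega
          rw [this]; omega
    · rw [pvBsearch_stop s e lo hi h]
      exact ⟨hlow, fun i h1 h2 => hhigh i (by omega) h2, by omega⟩

-- pairwise-on-values, in getD form
theorem pvStairs_sorted_getD (bs : List Int) :
    ∀ i j, i < j → j < (pvStairs bs).length →
      ((pvStairs bs).getD i (0,0)).1 < ((pvStairs bs).getD j (0,0)).1 := by
  intro i j hij hj
  have hp := (pvStairs_inv bs).1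
  rw [List.pairwise_iff_getElem] at hp
  have := hp i j (by omega) hj hij
  rw [List.getD_eq_getElem _ _ (by omega), List.getD_eq_getElem _ _ hj]
  exact this

-- from the bsearch bounds to the first-greater stair
theorem pvFirstGt_of_bounds (e : Int) :
    ∀ (s : List (Int × Int)) (r : Nat), r ≤ s.length →
      (∀ i < r, (s.getD i (0,0)).1 ≤ e) →
      (∀ i, r ≤ i → i < s.length → e < (s.getD i (0,0)).1) →
      pvFirstGt e s = if r < s.length then some ((s.getD r (0,0)).2) else none := by
  intro s
  induction s with
  | nil => intro r hr _ _; simp [pvFirstGt]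
  | cons p t ih =>
    intro r hr hlow hhigh
    cases r with
    | zero =>
      have : e < p.1 := by simpa using hhigh 0 (by omega) (by simp)
      simp [pvFirstGt, this]
    | succ r' =>
      have hp1 : p.1 ≤ e := by simpa using hlow 0 (by omega)
      have hrec := ih r' (by simpa using hr)
        (fun i hi => by simpa using hlow (i+1) (by omega))
        (fun i h1 h2 => by simpa using hhigh (i+1) (by omega) (by simpa using h2))
      simp only [pvFirstGt, if_neg (show ¬ e < p.1 by omega), hrec]
      simp

-- the two binning rules agree
theorem pvBin_eq (bs : List Int) (e : Int) :
    (match pvInnerA e (PySem.List.enumerate bs 0) with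
      | some idx => idx.toNat
      | none => bs.length - 1) =
    (if pvBsearch (pvStairs bs) e 0 (pvStairs bs).length < (pvStairs bs).length then
        (((pvStairs bs).getD (pvBsearch (pvStairs bs) e 0 (pvStairs bs).length) (0,0)).2).toNat
      else bs.length - 1) := by
  have hinv := pvBsearch_inv (pvStairs bs) e (pvStairs_sorted_getD bs)
    (pvStairs bs).length 0 (pvStairs bs).length (by omega) (le_refl _) (by omega)
    (fun i hi => absurd hi (by omega))
    (fun i h1 h2 => absurd h2 (by omega))
  have hfg := pvFirstGt_of_bounds e (pvStairs bs)
    (pvBsearch (pvStairs bs) e 0 (pvStairs bs).length)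
    hinv.2.2 hinv.1 hinv.2.1
  rw [pvFirstGt_stairs] at hfg
  rw [hfg]
  by_cases hr : pvBsearch (pvStairs bs) e 0 (pvStairs bs).length < (pvStairs bs).length <;>
    simp [hr]

-- appendAt preserves length
theorem pvAppendAt_length (xs : List (List Int)) (i : Nat) (v : Int) :
    (pvAppendAt xs i v).length = xs.length := by
  simp [pvAppendAt]

-- fold equality under the length invariant
theorem pvFold_eq (bs : List Int) (l : List (Int × Int)) :
    ∀ intervals : List (List Int), intervals.length = bs.length →
      l.foldl (fun intervals p =>
        match pvInnerA p.2 (PySem.List.enumerate bs 0) with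
        | some idx => pvAppendAt intervals idx.toNat p.1
        | none => pvAppendAt intervals (intervals.length - 1) p.1) intervals =
      l.foldl (fun intervals p =>
        let lo := pvBsearch (pvStairs bs) p.2 0 (pvStairs bs).length
        let idx := if lo < (pvStairs bs).length then (((pvStairs bs).getD lo (0,0)).2).toNat
          else bs.length - 1
        pvAppendAt intervals idx p.1) intervals := by
  induction l with
  | nil => intro intervals _; rfl
  | cons p t ih =>
    intro intervals hlen
    simp only [List.foldl_cons]
    have hbin := pvBin_eq bs p.2
    have hstep : (match pvInnerA p.2 (PySem.List.enumerate bs 0) with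
        | some idx => pvAppendAt intervals idx.toNat p.1
        | none => pvAppendAt intervals (intervals.length - 1) p.1) =
        pvAppendAt intervals (if pvBsearch (pvStairs bs) p.2 0 (pvStairs bs).length <
            (pvStairs bs).length then
          (((pvStairs bs).getD (pvBsearch (pvStairs bs) p.2 0 (pvStairs bs).length) (0,0)).2).toNat
          else bs.length - 1) p.1 := by
      rcases hA : pvInnerA p.2 (PySem.List.enumerate bs 0) with _ | j <;>
        rw [hA] at hbin <;> simp only at hbin
      · simp only [hlen, ← hbin]
      · simp only [← hbin]
    rw [hstep]
    exact ih _ (by rw [pvAppendAt_length, hlen])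

-- ===== VERDICT (by name: the statement is the Claim_ definition above) =====
theorem generateFeaturesByBins_spec : Claim_equal_generateFeaturesByBins := by
  intro npArray binsBorders _ _
  unfold Spec_generateFeaturesByBins generateFeaturesByBins generateFeaturesByBins_alt
  exact pvFold_eq binsBorders (PySem.List.enumerate npArray 0)
    (binsBorders.map (fun _ => ([] : List Int))) (by simp)
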